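-- pv_equiv track=rewrite | github.com/folabas/disease_outbreak_prediction | audit_who_mapping.py | suggest_canonical
-- ===== SOURCE A (Python) =====
-- from typing import Optional, Tuple
--
-- def suggest_canonical(label: str) -> Optional[str]:
--     if not isinstance(label, str):
--         return None
--     l = label.strip().lower()
--     # Strip common suffixes like "cases", "deaths"
--     l = l.replace("cases", "").replace("deaths", "").strip()
--     # Heuristic mappings for common outbreak diseases
--     if any(k in l for k in ["covid", "coronavirus", "sars-cov"]):
--         return "Covid-19"
--     if "lassa" in l:
--         return "Lassa Fever"
--     if any(k in l for k in ["yellow", "y.f", "yf"]):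
--         return "Yellow Fever"
--     if any(k in l for k in ["mening", "csm", "cerebrospinal"]):
--         return "Meningitis"
--     if "cholera" in l:
--         return "Cholera"
--     if any(k in l for k in ["mpox", "monkeypox"]):
--         return "Mpox"
--     if "measles" in l:
--         return "Measles"
--     if "dengue" in l:
--         return "Dengue"
--     if "malaria" in l:
--         return "Malaria"
--     if "polio" in l:
--         return "Polio"
--     if "typhoid" in l:
--         return "Typhoid"
--     if any(k in l for k in ["influenza", "flu"]):
--         return "Influenza"
--     if "hepatitis a" in l:
--         return "Hepatitis A"
--     if "hepatitis b" in l: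
--         return "Hepatitis B"
--     if "hepatitis e" in l:
--         return "Hepatitis E"
--     if "diphtheria" in l:
--         return "Diphtheria"
--     if "pertussis" in l or "whooping" in l:
--         return "Pertussis"
--     if "rabies" in l:
--         return "Rabies"
--     if "rotavirus" in l:
--         return "Rotavirus"
--     if "ebola" in l:
--         return "Ebola"
--     if "norovirus" in l:
--         return "Norovirus"
--     if "plague" in l:
--         return "Plague"
--     if "leprosy" in l:
--         return "Leprosy"
--     if "anthrax" in l:
--         return "Anthrax"
--     # Add more if needed
--     return None
-- ===== SOURCE B (Python) =====
-- from typing import Optional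
--
-- # Alternative algorithm: instead of testing each keyword against the label
-- # (pattern-driven, 25 branches of substring searches), scan the preprocessed
-- # text once position by position and look each fixed-length window up in a
-- # keyword -> rule-priority hash table, keeping the minimal priority seen.
-- _RULES = [
--     (("covid", "coronavirus", "sars-cov"), "Covid-19"),
--     (("lassa",), "Lassa Fever"),
--     (("yellow", "y.f", "yf"), "Yellow Fever"),
--     (("mening", "csm", "cerebrospinal"), "Meningitis"),
--     (("cholera",), "Cholera"),
--     (("mpox", "monkeypox"), "Mpox"),
--     (("measles",), "Measles"),
--     (("dengue",), "Dengue"),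
--     (("malaria",), "Malaria"),
--     (("polio",), "Polio"),
--     (("typhoid",), "Typhoid"),
--     (("influenza", "flu"), "Influenza"),
--     (("hepatitis a",), "Hepatitis A"),
--     (("hepatitis b",), "Hepatitis B"),
--     (("hepatitis e",), "Hepatitis E"),
--     (("diphtheria",), "Diphtheria"),
--     (("pertussis", "whooping"), "Pertussis"),
--     (("rabies",), "Rabies"),
--     (("rotavirus",), "Rotavirus"),
--     (("ebola",), "Ebola"),
--     (("norovirus",), "Norovirus"),
--     (("plague",), "Plague"),
--     (("leprosy",), "Leprosy"),
--     (("anthrax",), "Anthrax"),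
-- ]
-- _NAMES = [name for _, name in _RULES]
-- _KW = dict((k, i) for i, (keys, _) in enumerate(_RULES) for k in keys)
-- _LENS = sorted({len(k) for k in _KW})
--
-- def suggest_canonical(label: str) -> Optional[str]:
--     if not isinstance(label, str):
--         return None
--     l = label.strip().lower()
--     l = l.replace("cases", "").replace("deaths", "").strip()
--     n = len(l)
--     best = None
--     for i in range(n):
--         for L in _LENS:
--             if i + L <= n:
--                 r = _KW.get(l[i:i + L])
--                 if r is not None and (best is None or r < best):
--                     best = r
--     return None if best is None else _NAMES[best]
-- ===== Notes on version B (the rewrite author's own statement) =====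
-- stated objective: alternative
-- what changed: Instead of testing each of the 25 hard-coded keywords for containment in the label (pattern-driven if-chain), B scans the preprocessed label once position by position, looks each fixed-length window up in a keyword-to-priority hash table, and returns the canonical name of the minimal priority found.
import Mathlib
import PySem

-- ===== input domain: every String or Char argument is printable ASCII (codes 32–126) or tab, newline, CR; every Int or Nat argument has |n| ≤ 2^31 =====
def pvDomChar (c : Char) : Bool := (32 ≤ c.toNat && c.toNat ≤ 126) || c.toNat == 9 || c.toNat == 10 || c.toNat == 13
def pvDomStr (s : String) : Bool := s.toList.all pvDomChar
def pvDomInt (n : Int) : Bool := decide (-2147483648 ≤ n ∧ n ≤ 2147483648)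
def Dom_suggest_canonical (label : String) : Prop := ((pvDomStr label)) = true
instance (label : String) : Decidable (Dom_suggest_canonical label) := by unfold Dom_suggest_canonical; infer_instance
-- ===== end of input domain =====

-- B replaces A's pattern-driven 25-branch if-chain of substring searches by a single text-driven scan:
-- each fixed-length window of the preprocessed label is looked up in a keyword → rule-priority hash table
-- and the canonical name of the minimal priority found is returned (alternative algorithm, same cost class).

-- ===== PORT A =====
-- the preprocessing 'l = label.strip().lower(); l = l.replace(...).replace(...).strip()' (identical in both Pythons)
def pvPrep (label : String) : String :=
  PySem.Str.strip (PySem.Str.replace (PySem.Str.replace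
    (PySem.Str.lower (PySem.Str.strip label)) "cases" "") "deaths" "")

-- A's if-chain over the preprocessed string l
def pvChainA (l : String) : Option String :=
  if (["covid", "coronavirus", "sars-cov"].any fun k => PySem.Str.isIn k l) then some "Covid-19"
  else if PySem.Str.isIn "lassa" l then some "Lassa Fever"
  else if (["yellow", "y.f", "yf"].any fun k => PySem.Str.isIn k l) then some "Yellow Fever"
  else if (["mening", "csm", "cerebrospinal"].any fun k => PySem.Str.isIn k l) then some "Meningitis"
  else if PySem.Str.isIn "cholera" l then some "Cholera"
  else if (["mpox", "monkeypox"].any fun k => PySem.Str.isIn k l) then some "Mpox"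
  else if PySem.Str.isIn "measles" l then some "Measles"
  else if PySem.Str.isIn "dengue" l then some "Dengue"
  else if PySem.Str.isIn "malaria" l then some "Malaria"
  else if PySem.Str.isIn "polio" l then some "Polio"
  else if PySem.Str.isIn "typhoid" l then some "Typhoid"
  else if (["influenza", "flu"].any fun k => PySem.Str.isIn k l) then some "Influenza"
  else if PySem.Str.isIn "hepatitis a" l then some "Hepatitis A"
  else if PySem.Str.isIn "hepatitis b" l then some "Hepatitis B"
  else if PySem.Str.isIn "hepatitis e" l then some "Hepatitis E"
  else if PySem.Str.isIn "diphtheria" l then some "Diphtheria"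
  else if PySem.Str.isIn "pertussis" l || PySem.Str.isIn "whooping" l then some "Pertussis"
  else if PySem.Str.isIn "rabies" l then some "Rabies"
  else if PySem.Str.isIn "rotavirus" l then some "Rotavirus"
  else if PySem.Str.isIn "ebola" l then some "Ebola"
  else if PySem.Str.isIn "norovirus" l then some "Norovirus"
  else if PySem.Str.isIn "plague" l then some "Plague"
  else if PySem.Str.isIn "leprosy" l then some "Leprosy"
  else if PySem.Str.isIn "anthrax" l then some "Anthrax"
  else none

def suggest_canonical (label : String) : Option String :=
  let l := pvPrep label
  pvChainA l

-- ===== PORT B =====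
-- Source B's _RULES
def pvRules : List (List String × String) :=
  [ (["covid", "coronavirus", "sars-cov"], "Covid-19"),
    (["lassa"], "Lassa Fever"),
    (["yellow", "y.f", "yf"], "Yellow Fever"),
    (["mening", "csm", "cerebrospinal"], "Meningitis"),
    (["cholera"], "Cholera"),
    (["mpox", "monkeypox"], "Mpox"),
    (["measles"], "Measles"),
    (["dengue"], "Dengue"),
    (["malaria"], "Malaria"),
    (["polio"], "Polio"),
    (["typhoid"], "Typhoid"),
    (["influenza", "flu"], "Influenza"),
    (["hepatitis a"], "Hepatitis A"),
    (["hepatitis b"], "Hepatitis B"),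
    (["hepatitis e"], "Hepatitis E"),
    (["diphtheria"], "Diphtheria"),
    (["pertussis", "whooping"], "Pertussis"),
    (["rabies"], "Rabies"),
    (["rotavirus"], "Rotavirus"),
    (["ebola"], "Ebola"),
    (["norovirus"], "Norovirus"),
    (["plague"], "Plague"),
    (["leprosy"], "Leprosy"),
    (["anthrax"], "Anthrax") ]

-- Source B's _NAMES
def pvNames : List String := pvRules.map Prod.snd

-- Source B's _KW = dict((k, i) for i, (keys, _) in enumerate(_RULES) for k in keys)
def pvKWpairs : List (String × Int) :=
  (PySem.List.enumerate pvRules 0).flatMap (fun p => p.2.1.map (fun k => (k, p.1)))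

def pvKW : PySem.Dict String Int := PySem.Dict.ofList pvKWpairs

-- Source B's _LENS = sorted({len(k) for k in _KW})
def pvLens : List Int :=
  PySem.List.sorted (PySem.Set.ofList ((PySem.Dict.keys pvKW).map PySem.Str.len)) (fun x => x) false

-- the window-scanning loop nest of B (n = len(l); best starts as None)
def pvScan (l : String) : Option Int :=
  (PySem.List.pyRange 0 (PySem.Str.len l) 1).foldl (fun best i =>
    pvLens.foldl (fun best L =>
      if i + L ≤ PySem.Str.len l then
        match pvKW.get? (PySem.Str.slice l (some i) (some (i + L))) with
        | some r =>
          match best with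
          | none => some r
          | some b => if r < b then some r else some b
        | none => best
      else best) best) none

-- 'return None if best is None else _NAMES[best]' with best = the scan over the preprocessed label
def suggest_canonical_alt (label : String) : Option String :=
  match pvScan (pvPrep label) with
  | none => none
  | some r => PySem.List.pyGet? pvNames r

-- ===== PRECONDITION & SPEC =====
def Spec_suggest_canonical (label : String) (out : Option String) : Prop := out = suggest_canonical_alt label
instance (label : String) (out : Option String) : Decidable (Spec_suggest_canonical label out) := by unfold Spec_suggest_canonical; infer_instance

-- ===== CLAIM (what is proved, stated in full; the proofs are below) =====
def Claim_equal_suggest_canonical : Prop := ∀ (label : String), Dom_suggest_canonical label → Spec_suggest_canonical label (suggest_canonical label)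

-- ===== LEMMAS AND PROOFS =====

-- the accumulator update of B's scan, named for the proofs
def pvStep (b : Option Int) (r : Int) : Option Int :=
  match b with
  | none => some r
  | some x => if r < x then some r else some x

def pvQ (l : String) (k : String) : Bool := PySem.Str.isIn k l

def pvMatch (l : String) (p : List String × String) : Bool := p.1.any (pvQ l)

-- the candidate priority produced by window (i, L)
def pvCand (l : String) (i L : Int) : Option Int :=
  if i + L ≤ PySem.Str.len l then pvKW.get? (PySem.Str.slice l (some i) (some (i + L))) else none

-- all candidate priorities, in B's traversal order
def pvC (l : String) : List Int :=
  (PySem.List.pyRange 0 (PySem.Str.len l) 1).flatMap (fun i => pvLens.filterMap (pvCand l i))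

theorem pv_fold_inner (l : String) (i : Int) (ls : List Int) (b : Option Int) :
    ls.foldl (fun best L =>
      if i + L ≤ PySem.Str.len l then
        match pvKW.get? (PySem.Str.slice l (some i) (some (i + L))) with
        | some r =>
          match best with
          | none => some r
          | some b => if r < b then some r else some b
        | none => best
      else best) b = (ls.filterMap (pvCand l i)).foldl pvStep b := by
  induction ls generalizing b with
  | nil => rfl
  | cons L ls ih =>
    rw [List.foldl_cons, List.filterMap_cons]
    by_cases h : i + L ≤ PySem.Str.len l
    · rw [if_pos h]
      unfold pvCand
      rw [if_pos h]
      cases hg : pvKW.get? (PySem.Str.slice l (some i) (some (i + L))) with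
      | none => exact ih b
      | some r => exact ih (pvStep b r)
    · rw [if_neg h]
      unfold pvCand
      rw [if_neg h]
      exact ih b

theorem pv_fold_flat (g : Int → List Int) (xs : List Int) (b : Option Int) :
    xs.foldl (fun b i => (g i).foldl pvStep b) b = (xs.flatMap g).foldl pvStep b := by
  induction xs generalizing b with
  | nil => rfl
  | cons x xs ih => rw [List.foldl_cons, List.flatMap_cons, List.foldl_append]; exact ih _

theorem pv_scan_eq (l : String) : pvScan l = (pvC l).foldl pvStep none := by
  unfold pvScan pvC
  rw [← pv_fold_flat]
  apply PySem.List.foldl_congr_mem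
  intro acc i _
  exact pv_fold_inner l i pvLens acc

theorem pv_step_min (c : List Int) (b : Int) : c.foldl pvStep (some b) = some (c.foldl min b) := by
  induction c generalizing b with
  | nil => rfl
  | cons a c ih =>
    rw [List.foldl_cons, List.foldl_cons]
    have h : pvStep (some b) a = some (min b a) := by
      simp only [pvStep]
      split_ifs with h
      · rw [min_def, if_neg (by omega)]
      · rw [min_def, if_pos (by omega)]
    rw [h, ih]

theorem pv_mfold_min? (c : List Int) : c.foldl pvStep none = c.min? := by
  cases c with
  | nil => rfl
  | cons a c =>
    show c.foldl pvStep (some a) = _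
    rw [pv_step_min]
    rfl

theorem pv_mem_enumerate {α : Type} (xs : List α) (s i : Int) (x : α) :
    (i, x) ∈ PySem.List.enumerate xs s ↔ ∃ j : Nat, ∃ _ : j < xs.length, xs[j] = x ∧ i = s + j := by
  induction xs generalizing s with
  | nil => simp [PySem.List.enumerate_nil]
  | cons y ys ih =>
    rw [PySem.List.enumerate_cons, List.mem_cons]
    constructor
    · rintro (h | h)
      · injection h with h1 h2
        refine ⟨0, by simp, by simpa using h2.symm, by simp [h1]⟩
      · obtain ⟨j, hj, hx, hi⟩ := (ih (s + 1)).1 h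
        refine ⟨j + 1, by simpa using Nat.succ_lt_succ hj, by simpa using hx, ?_⟩
        rw [hi]; push_cast; ring
    · rintro ⟨j, hj, hx, hi⟩
      cases j with
      | zero =>
        left
        have hy : y = x := by simpa using hx
        have hs : i = s := by simpa using hi
        rw [hy, hs]
      | succ j =>
        right
        refine (ih (s + 1)).2 ⟨j, by simpa using hj, by simpa using hx, ?_⟩
        rw [hi]; push_cast; ring

theorem pv_pairs_iff (k : String) (r : Int) :
    (k, r) ∈ pvKWpairs ↔ ∃ j : Nat, ∃ _ : j < pvRules.length, r = (j : Int) ∧ k ∈ (pvRules[j]).1 := by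
  unfold pvKWpairs
  rw [List.mem_flatMap]
  constructor
  · rintro ⟨⟨i, q⟩, hp, hk⟩
    rw [List.mem_map] at hk
    obtain ⟨k', hk', heq⟩ := hk
    injection heq with e1 e2
    obtain ⟨j, hj, hx, hi⟩ := (pv_mem_enumerate pvRules 0 i q).1 hp
    refine ⟨j, hj, by omega, ?_⟩
    rw [hx]
    rw [e1] at hk'
    exact hk'
  · rintro ⟨j, hj, rfl, hk⟩
    refine ⟨((j : Int), pvRules[j]), (pv_mem_enumerate pvRules 0 _ _).2 ⟨j, hj, rfl, by omega⟩, ?_⟩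
    rw [List.mem_map]
    exact ⟨k, hk, rfl⟩

set_option maxRecDepth 100000 in
theorem pv_items : pvKW.items = pvKWpairs := by decide

set_option maxRecDepth 100000 in
theorem pv_nodup : pvKW.keys.Nodup := by decide

set_option maxRecDepth 100000 in
theorem pv_len_mem : ∀ p ∈ pvKWpairs, ((p.1.toList.length : Int)) ∈ pvLens ∧ p.1.toList ≠ [] := by decide

set_option maxRecDepth 100000 in
theorem pv_lens_nonneg : ∀ L ∈ pvLens, 0 ≤ L := by decide

theorem pv_get_iff (k : String) (r : Int) : pvKW.get? k = some r ↔ (k, r) ∈ pvKWpairs := by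
  rw [PySem.Dict.get?_eq_some_iff_mem_items pvKW k r pv_nodup, pv_items]

theorem pv_memC (l : String) (r : Int) :
    r ∈ pvC l ↔ ∃ k, (k, r) ∈ pvKWpairs ∧ pvQ l k = true := by
  unfold pvC
  rw [List.mem_flatMap]
  constructor
  · rintro ⟨i, hi, hmem⟩
    rw [PySem.List.mem_pyRange_one] at hi
    rw [List.mem_filterMap] at hmem
    obtain ⟨L, hL, hcand⟩ := hmem
    unfold pvCand at hcand
    by_cases h : i + L ≤ PySem.Str.len l
    · rw [if_pos h] at hcand
      refine ⟨PySem.Str.slice l (some i) (some (i + L)), (pv_get_iff _ _).1 hcand, ?_⟩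
      unfold pvQ
      rw [PySem.Str.isIn_eq]
      rw [← PySem.Chars.exists_prefix_drop_iff_isIn]
      refine ⟨i.toNat, ?_⟩
      have hL0 : 0 ≤ L := pv_lens_nonneg L hL
      rw [PySem.Str.toList_slice, PySem.Chars.slice_eq_listSlice,
        PySem.List.slice_toNat _ hi.1 (by omega)]
      exact List.take_prefix _ _
    · rw [if_neg h] at hcand
      exact absurd hcand (by simp)
  · rintro ⟨k, hk, hq⟩
    obtain ⟨hklen, hkne⟩ := pv_len_mem _ hk
    have hkpos : 0 < k.toList.length := List.length_pos_of_ne_nil hkne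
    unfold pvQ at hq
    rw [PySem.Str.isIn_eq, ← PySem.Chars.exists_prefix_drop_iff_isIn] at hq
    obtain ⟨j, hpre⟩ := hq
    have hlen := hpre.length_le
    rw [List.length_drop] at hlen
    have hjlen : j + k.toList.length ≤ l.toList.length := by omega
    refine ⟨(j : Int), ?_, ?_⟩
    · rw [PySem.List.mem_pyRange_one, PySem.Str.len_eq]
      constructor
      · omega
      · omega
    · rw [List.mem_filterMap]
      refine ⟨(k.toList.length : Int), hklen, ?_⟩
      unfold pvCand
      rw [if_pos (by rw [PySem.Str.len_eq]; omega)]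
      have hkey : PySem.Str.slice l (some (j : Int)) (some ((j : Int) + (k.toList.length : Int))) = k := by
        have htl : (PySem.Str.slice l (some (j : Int)) (some ((j : Int) + (k.toList.length : Int)))).toList
            = k.toList := by
          rw [PySem.Str.toList_slice, PySem.Chars.slice_eq_listSlice]
          have hb : ((j : Int) + (k.toList.length : Int)) = ((j + k.toList.length : Nat) : Int) := by
            push_cast; ring
          rw [hb, PySem.List.slice_natCast]
          have : j + k.toList.length - j = k.toList.length := by omega
          rw [this]
          exact (List.prefix_iff_eq_take.1 hpre).symm
        have := congrArg String.ofList htl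
        rwa [String.ofList_toList, String.ofList_toList] at this
      rw [hkey]
      exact (pv_get_iff _ _).2 hk

theorem pv_find?_map_snd {α β : Type} (p : α × β → Bool) (t : List (α × β)) :
    (t.find? p).map Prod.snd = t.foldr (fun x r => if p x then some x.2 else r) none := by
  induction t with
  | nil => rfl
  | cons a t ih => cases h : p a <;> simp [h, ih]

theorem pv_chain_eq (l : String) :
    pvChainA l = (pvRules.find? (pvMatch l)).map Prod.snd := by
  rw [pv_find?_map_snd]
  simp only [pvChainA, pvRules, pvMatch, pvQ, List.foldr_cons, List.foldr_nil, List.any_cons,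
    List.any_nil, Bool.or_false]

-- ===== VERDICT (by name: the statement is the Claim_ definition above) =====
theorem suggest_canonical_spec : Claim_equal_suggest_canonical := by
  intro label _
  unfold Spec_suggest_canonical
  have hA : suggest_canonical label = (pvRules.find? (pvMatch (pvPrep label))).map Prod.snd :=
    pv_chain_eq (pvPrep label)
  have hB : suggest_canonical_alt label =
      (match (pvC (pvPrep label)).min? with
       | none => none
       | some r => PySem.List.pyGet? pvNames r) := by
    unfold suggest_canonical_alt
    rw [pv_scan_eq, pv_mfold_min?]
  rw [hA, hB]
  cases hf : pvRules.find? (pvMatch (pvPrep label)) with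
  | none =>
    rw [List.find?_eq_none] at hf
    have hC : pvC (pvPrep label) = [] := by
      rw [List.eq_nil_iff_forall_not_mem]
      intro r hr
      obtain ⟨k, hk, hq⟩ := (pv_memC (pvPrep label) r).1 hr
      obtain ⟨j, hj, rfl, hkmem⟩ := (pv_pairs_iff k r).1 hk
      have hm : pvMatch (pvPrep label) pvRules[j] = true := by
        unfold pvMatch
        rw [List.any_eq_true]
        exact ⟨k, hkmem, hq⟩
      exact absurd hm (by simpa using hf _ (List.getElem_mem hj))
    rw [hC]
    rfl
  | some p =>
    rw [List.find?_eq_some_iff_getElem] at hf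
    obtain ⟨hp, i0, hi0, hpi, hmin⟩ := hf
    have hmem : ((i0 : Int)) ∈ pvC (pvPrep label) := by
      have hm : pvMatch (pvPrep label) pvRules[i0] = true := by rw [hpi]; exact hp
      unfold pvMatch at hm
      rw [List.any_eq_true] at hm
      obtain ⟨k, hkmem, hq⟩ := hm
      exact (pv_memC _ _).2 ⟨k, (pv_pairs_iff k _).2 ⟨i0, hi0, rfl, hkmem⟩, hq⟩
    have hle : ∀ x ∈ pvC (pvPrep label), (i0 : Int) ≤ x := by
      intro x hx
      obtain ⟨k, hk, hq⟩ := (pv_memC (pvPrep label) x).1 hx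
      obtain ⟨j, hj, rfl, hkmem⟩ := (pv_pairs_iff k x).1 hk
      have hnlt : ¬ j < i0 := by
        intro hlt
        have hb := hmin j hlt
        have hm : pvMatch (pvPrep label) pvRules[j] = true := by
          unfold pvMatch
          rw [List.any_eq_true]
          exact ⟨k, hkmem, hq⟩
        rw [hm] at hb
        simp at hb
      exact_mod_cast Nat.le_of_not_lt hnlt
    have hmin? : (pvC (pvPrep label)).min? = some (i0 : Int) :=
      List.min?_eq_some_iff.2 ⟨hmem, hle⟩
    rw [hmin?]
    show some p.2 = PySem.List.pyGet? pvNames (i0 : Int)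
    rw [PySem.List.pyGet?_natCast]
    unfold pvNames
    rw [List.getElem?_map, List.getElem?_eq_getElem hi0, hpi]
    rfl
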